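-- pv_equiv track=rewrite | github.com/Nathan-zh/toxic_classification | baseline.py | data_prepro
-- ===== SOURCE A (Python) =====
-- def data_prepro(x_input):
--     # delete punctuation and duplicated space
--     whitelist = set('abcdefghijklmnopqrstuvwxyz 1234567890')
--     x_output = []
--     for m in x_input:
--         all_text = ''.join(filter(whitelist.__contains__, m.lower()))
--         text = ' '.join(all_text.split())
--         x_output.append(text)
--
--     return x_output
-- ===== SOURCE B (Python) =====
-- WHITELIST = frozenset('abcdefghijklmnopqrstuvwxyz 1234567890')
--
-- def _clean(m):
--     # single pass: keep whitelisted chars, collapse runs of spaces, strip ends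
--     out = []
--     pending_space = False
--     for c in m.lower():
--         if c not in WHITELIST:
--             continue
--         if c == ' ':
--             pending_space = True
--         else:
--             if pending_space and out:
--                 out.append(' ')
--             pending_space = False
--             out.append(c)
--     return ''.join(out)
--
-- def data_prepro(x_input):
--     return [_clean(m) for m in x_input]
-- ===== Notes on version B (the rewrite author's own statement) =====
-- stated objective: alternative
-- what changed: Replaces A's three-phase filter / split-on-whitespace / join pipeline per string with a single left-to-right pass maintaining an output buffer and a pending-space flag.
import Mathlib
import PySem

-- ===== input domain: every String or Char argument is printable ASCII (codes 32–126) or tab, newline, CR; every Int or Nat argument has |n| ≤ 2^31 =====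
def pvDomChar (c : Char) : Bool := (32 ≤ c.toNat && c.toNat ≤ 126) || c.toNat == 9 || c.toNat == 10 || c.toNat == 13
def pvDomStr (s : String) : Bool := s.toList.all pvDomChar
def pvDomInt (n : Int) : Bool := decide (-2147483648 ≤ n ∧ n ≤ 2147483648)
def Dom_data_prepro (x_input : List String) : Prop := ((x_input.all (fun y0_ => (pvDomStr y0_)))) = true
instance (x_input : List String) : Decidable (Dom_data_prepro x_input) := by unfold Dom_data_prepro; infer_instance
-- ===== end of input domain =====

-- B replaces A's per-string filter / split / join pipeline by one pass with a pending-space flag (alternative decomposition, same cost).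


-- ===== PORT A =====
-- whitelist = set('abcdefghijklmnopqrstuvwxyz 1234567890')
def pvWhitelist : PySem.Set Char := PySem.Set.ofList "abcdefghijklmnopqrstuvwxyz 1234567890".toList

-- ''.join(filter(whitelist.__contains__, m.lower())) is the filtered char list itself (exact);
-- ' '.join(all_text.split()) via PySem.Chars.join / split₀ (exact).
def data_prepro (x_input : List String) : List String :=
  x_input.foldl (fun x_output m =>
    let all_text := (PySem.Chars.lower m.toList).filter (fun c => PySem.Set.contains pvWhitelist c)
    let text := PySem.Chars.join [' '] (PySem.Chars.split₀ all_text)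
    x_output ++ [String.mk text]) []

-- ===== PORT B =====
def pvWhitelistChars : List Char := "abcdefghijklmnopqrstuvwxyz 1234567890".toList

-- the single pass of Source B's _clean: out buffer + pending_space flag
def pvCleanGo : List Char → List Char → Bool → List Char
  | [], out, _ => out
  | c :: rest, out, pending =>
    if pvWhitelistChars.contains c then
      if c = ' ' then pvCleanGo rest out true
      else pvCleanGo rest (out ++ (if pending && !out.isEmpty then [' '] else []) ++ [c]) false
    else pvCleanGo rest out pending

def data_prepro_alt (x_input : List String) : List String :=
  x_input.map (fun m => String.mk (pvCleanGo (PySem.Chars.lower m.toList) [] false))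

-- ===== PRECONDITION & SPEC =====
def Spec_data_prepro (x_input : List String) (out : List String) : Prop := out = data_prepro_alt x_input
instance (x_input : List String) (out : List String) : Decidable (Spec_data_prepro x_input out) := by unfold Spec_data_prepro; infer_instance

-- ===== CLAIM (what is proved, stated in full; the proofs are below) =====
def Claim_equal_data_prepro : Prop := ∀ (x_input : List String), Dom_data_prepro x_input → Spec_data_prepro x_input (data_prepro x_input)

-- ===== LEMMAS AND PROOFS =====

-- characters outside the whitelist are skipped by the pass
lemma pvCleanGo_filter (cs : List Char) (out : List Char) (pending : Bool) :
    pvCleanGo cs out pending = pvCleanGo (cs.filter (fun c => pvWhitelistChars.contains c)) out pending := by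
  induction cs generalizing out pending with
  | nil => rfl
  | cons c rest ih =>
    by_cases h : c ∈ pvWhitelistChars
    · by_cases hsp : c = ' '
      · subst hsp; simp [pvCleanGo, List.filter_cons, h, ih]
      · simp [pvCleanGo, List.filter_cons, h, hsp, ih]
    · simp [pvCleanGo, List.filter_cons, h, ih]

lemma pvWhitelist_char (c : Char) (h : c ∈ pvWhitelistChars) :
    c = ' ' ∨ PySem.Chars.isspace c = false := by
  have hall : pvWhitelistChars.all (fun c => c == ' ' || !PySem.Chars.isspace c) = true := by decide
  have h2 := List.all_eq_true.mp hall c h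
  simp only [Bool.or_eq_true, beq_iff_eq, Bool.not_eq_true'] at h2
  exact h2

lemma pv_join_ne_nil (w : List Char) (ws : List (List Char)) (hw : w ≠ []) :
    PySem.Chars.join [' '] (w :: ws) ≠ [] := by
  cases ws with
  | nil => simpa [PySem.Chars.join, List.intercalate] using hw
  | cons w' t =>
    simp only [PySem.Chars.join, List.intercalate, List.intersperse, List.flatten]
    intro hcontra
    rcases List.append_eq_nil_iff.mp hcontra with ⟨h1, _⟩
    exact hw h1

lemma pv_join_snoc (ws : List (List Char)) (w : List Char) (hws : ws ≠ []) :
    PySem.Chars.join [' '] (ws ++ [w]) = PySem.Chars.join [' '] ws ++ [' '] ++ w := by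
  induction ws with
  | nil => exact absurd rfl hws
  | cons a t ih =>
    cases t with
    | nil => simp [PySem.Chars.join, List.intercalate]
    | cons b t' =>
      have hthis := ih (by simp)
      simp only [PySem.Chars.join, List.intercalate, List.cons_append] at hthis ⊢
      simp only [List.intersperse_cons₂, List.flatten_cons]
      rw [hthis]
      simp [List.append_assoc]

lemma pv_join_last_snoc (ws : List (List Char)) (w x : List Char) :
    PySem.Chars.join [' '] (ws ++ [w ++ x]) = PySem.Chars.join [' '] (ws ++ [w]) ++ x := by
  induction ws with
  | nil => simp [PySem.Chars.join, List.intercalate]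
  | cons a t ih =>
    cases t with
    | nil => simp [PySem.Chars.join, List.intercalate]
    | cons b t' =>
      simp only [PySem.Chars.join, List.intercalate, List.cons_append] at ih ⊢
      simp only [List.intersperse_cons₂, List.flatten_cons]
      rw [ih]
      simp [List.append_assoc]

-- main invariant: the single pass agrees with split₀.go followed by join
lemma pvCleanGo_eq_go (cs cur out : List Char) (acc : List (List Char)) (pending : Bool)
    (hcs : ∀ c ∈ cs, c ∈ pvWhitelistChars)
    (hw : ∀ w ∈ acc, w ≠ [])
    (hinv : if cur = [] then
              out = PySem.Chars.join [' '] acc.reverse ∧ (acc ≠ [] → pending = true)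
            else
              pending = false ∧ out = PySem.Chars.join [' '] (acc.reverse ++ [cur.reverse])) :
    pvCleanGo cs out pending = PySem.Chars.join [' '] (PySem.Chars.split₀.go cs cur acc) := by
  induction cs generalizing cur out acc pending with
  | nil =>
    simp only [pvCleanGo, PySem.Chars.split₀.go]
    by_cases hc : cur = []
    · simp only [hc, List.isEmpty_nil, if_true] at hinv ⊢
      exact hinv.1
    · have hie : cur.isEmpty = false := by simp [List.isEmpty_iff, hc]
      simp only [hie, Bool.false_eq_true, if_false, if_neg hc] at hinv ⊢
      rw [hinv.2]; simp
  | cons c rest ih =>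
    have hcmem : c ∈ pvWhitelistChars := hcs c (by simp)
    have hrest : ∀ x ∈ rest, x ∈ pvWhitelistChars := fun x hx => hcs x (by simp [hx])
    have hcw : pvWhitelistChars.contains c = true := by simpa using hcmem
    by_cases hsp : c = ' '
    · -- space: pending := true; split₀ closes the current word
      have hspace : PySem.Chars.isspace c = true := by subst hsp; decide
      simp only [pvCleanGo, hcw, if_true, if_pos hsp, PySem.Chars.split₀.go, hspace]
      by_cases hc : cur = []
      · simp only [hc, List.isEmpty_nil, if_true] at hinv ⊢
        exact ih [] out acc true hrest hw (by simp [hinv.1])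
      · have hie : cur.isEmpty = false := by simp [List.isEmpty_iff, hc]
        simp only [hie, Bool.false_eq_true, if_false, if_neg hc] at hinv ⊢
        refine ih [] out (cur.reverse :: acc) true hrest ?_ ?_
        · intro w hwmem
          rcases List.mem_cons.mp hwmem with h | h
          · subst h; simpa using hc
          · exact hw w h
        · simp only [if_true]
          constructor
          · rw [hinv.2]; simp
          · intro _; trivial
    · -- kept non-space char
      have hspace : PySem.Chars.isspace c = false := by
        rcases pvWhitelist_char c hcmem with h | h
        · exact absurd h hsp
        · exact h
      simp only [pvCleanGo, hcw, if_true, if_neg hsp, PySem.Chars.split₀.go, hspace,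
        Bool.false_eq_true, if_false]
      by_cases hc : cur = []
      · simp only [hc, if_true] at hinv
        by_cases ha : acc = []
        · -- out = [], guard false
          have hout : out = [] := by rw [hinv.1, ha]; rfl
          refine ih (c :: cur) (out ++ (if pending && !out.isEmpty then [' '] else []) ++ [c])
            acc false hrest hw ?_
          simp only [hc, List.cons_ne_nil, if_false, if_neg (List.cons_ne_nil c cur)]
          refine ⟨by simp, ?_⟩
          simp [hout, ha, hc, PySem.Chars.join, List.intercalate]
        · -- acc ≠ []: pending = true and out ≠ []
          have hp : pending = true := hinv.2 ha
          have hone : out ≠ [] := by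
            rw [hinv.1]
            rcases List.exists_cons_of_ne_nil (by simpa using ha : acc.reverse ≠ []) with ⟨w, ws, hws⟩
            rw [hws]
            exact pv_join_ne_nil w ws (hw w (by rw [← List.mem_reverse, hws]; simp))
          refine ih (c :: cur) (out ++ (if pending && !out.isEmpty then [' '] else []) ++ [c])
            acc false hrest hw ?_
          simp only [List.cons_ne_nil, if_neg (List.cons_ne_nil c cur)]
          refine ⟨by simp, ?_⟩
          have hguard : (pending && !out.isEmpty) = true := by
            simp [hp, List.isEmpty_iff, hone]
          rw [hguard, if_pos rfl, hinv.1, hc]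
          have hanil : acc.reverse ≠ [] := by simpa using ha
          rw [show (c :: ([] : List Char)).reverse = [c] from rfl,
            pv_join_snoc acc.reverse [c] hanil]
      · -- cur ≠ []: pending = false, just append c to the last word
        simp only [if_neg hc] at hinv
        refine ih (c :: cur) (out ++ (if pending && !out.isEmpty then [' '] else []) ++ [c])
          acc false hrest hw ?_
        simp only [if_neg (List.cons_ne_nil c cur)]
        obtain ⟨hp, hout⟩ := hinv
        subst hp
        refine ⟨by simp, ?_⟩
        simp only [Bool.false_and, Bool.false_eq_true, if_false, List.nil_append]
        rw [hout, List.reverse_cons, pv_join_last_snoc]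
        simp

-- per-string equality
lemma pv_clean_eq (m : String) :
    String.mk (pvCleanGo (PySem.Chars.lower m.toList) [] false) =
    String.mk (PySem.Chars.join [' '] (PySem.Chars.split₀
      ((PySem.Chars.lower m.toList).filter (fun c => PySem.Set.contains pvWhitelist c)))) := by
  have hwl : pvWhitelist = pvWhitelistChars := by decide
  have hfe : (PySem.Chars.lower m.toList).filter (fun c => PySem.Set.contains pvWhitelist c) =
      (PySem.Chars.lower m.toList).filter (fun c => pvWhitelistChars.contains c) := by
    simp [hwl, PySem.Set.contains]
  rw [hfe, pvCleanGo_filter]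
  congr 1
  have : PySem.Chars.split₀ ((PySem.Chars.lower m.toList).filter (fun c => pvWhitelistChars.contains c)) =
      PySem.Chars.split₀.go ((PySem.Chars.lower m.toList).filter (fun c => pvWhitelistChars.contains c)) [] [] := rfl
  rw [this]
  apply pvCleanGo_eq_go
  · intro c hc
    have := List.of_mem_filter hc
    simpa using this
  · intro w hw
    simp at hw
  · simp [PySem.Chars.join, List.intercalate]

lemma pv_foldl_append_eq_map {α β : Type} (f : α → β) (l : List α) :
    l.foldl (fun acc m => acc ++ [f m]) [] = l.map f := by
  suffices h : ∀ acc : List β, l.foldl (fun acc m => acc ++ [f m]) acc = acc ++ l.map f by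
    simpa using h []
  induction l with
  | nil => simp
  | cons a t ih => intro acc; simp [List.foldl_cons, ih]

-- ===== VERDICT (by name: the statement is the Claim_ definition above) =====
theorem data_prepro_spec : Claim_equal_data_prepro := by
  intro x_input _
  unfold Spec_data_prepro data_prepro data_prepro_alt
  rw [pv_foldl_append_eq_map]
  apply List.map_congr_left
  intro m _
  exact (pv_clean_eq m).symm
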